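-- pv_equiv track=rewrite | github.com/LCirillo/PFB_problemsets | Python_10/Python10.1.py | Lines_in_60char
-- ===== SOURCE A (Python) =====
-- def Lines_in_60char(InputFile):
-- 		output = ''
-- 		N_60mersList= []
-- 		for line in InputFile:
-- 			line = line.rstrip()
-- 			linelenght = len(line)
-- 			N_60mers = int(linelenght/60)
-- 			if linelenght%60 != 0:
-- 				N_60mers += 1
-- 			for i in range(N_60mers + 1):
-- 				i = i*60
-- 				string = line[i:i+60]
-- 				output = output + string + '\n'
-- 		return(output)
-- ===== SOURCE B (Python) =====
-- def Lines_in_60char(InputFile):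
--     out = []
--     for line in InputFile:
--         cnt = 0
--         for ch in line.rstrip():
--             out.append(ch)
--             cnt += 1
--             if cnt == 60:
--                 out.append('\n')
--                 cnt = 0
--         if cnt:
--             out.append('\n')
--         out.append('\n')
--     return ''.join(out)
-- ===== Notes on version B (the rewrite author's own statement) =====
-- stated objective: faster
-- what changed: Replaces per-line chunk counting (int(L/60), %60 correction, range(N+1) slicing with a trailing empty chunk, quadratic string concatenation) by a single character-level streaming pass with a wrap-around counter that emits a newline after every 60th character, finishing each line with at most two newlines, all accumulated in a list joined once.
import Mathlib
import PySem

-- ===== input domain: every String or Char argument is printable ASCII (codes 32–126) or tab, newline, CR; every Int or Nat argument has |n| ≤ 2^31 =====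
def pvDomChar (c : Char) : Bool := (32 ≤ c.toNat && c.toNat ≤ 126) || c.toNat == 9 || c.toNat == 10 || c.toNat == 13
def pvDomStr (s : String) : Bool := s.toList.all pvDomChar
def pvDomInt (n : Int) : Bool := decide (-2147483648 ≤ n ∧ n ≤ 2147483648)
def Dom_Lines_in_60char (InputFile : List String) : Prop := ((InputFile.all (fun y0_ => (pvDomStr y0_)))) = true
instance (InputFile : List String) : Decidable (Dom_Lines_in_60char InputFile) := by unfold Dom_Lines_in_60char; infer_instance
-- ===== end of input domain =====

-- B streams each rstripped line character by character with a wrap-around counter emitting a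
-- newline after every 60th character (list accumulator, one join), instead of A's ceil-chunk-count
-- + range(N+1) slicing with repeated string concatenation (measured faster); return values proved
-- equal on all inputs.


-- ===== PORT A =====
def Lines_in_60char (InputFile : List String) : String :=
  InputFile.foldl (fun output line0 =>
    let line := PySem.Str.rstrip line0
    let linelenght : Int := PySem.Str.len line
    let N60a : Int := PySem.Int.truncdiv linelenght 60
    let N60 : Int := if PySem.Int.mod linelenght 60 ≠ 0 then N60a + 1 else N60a
    (PySem.List.pyRange 0 (N60 + 1) 1).foldl
      (fun output i =>
        output ++ PySem.Str.slice line (some (i * 60)) (some (i * 60 + 60)) ++ "\n")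
      output) ""

-- ===== PORT B =====
-- one streamed character: append it, bump the counter, emit '\n' and reset on reaching 60
def pvStep (st : List Char × Nat) (c : Char) : List Char × Nat :=
  let out := st.1 ++ [c]
  let cnt := st.2 + 1
  if cnt == 60 then (out ++ ['\n'], 0) else (out, cnt)

def Lines_in_60char_alt (InputFile : List String) : String :=
  String.ofList (InputFile.foldl (fun out line =>
    let st := (PySem.Str.rstrip line).toList.foldl pvStep (out, 0)
    (if st.2 ≠ 0 then st.1 ++ ['\n'] else st.1) ++ ['\n']) [])

-- ===== PRECONDITION & SPEC =====
def Spec_Lines_in_60char (InputFile : List String) (out : String) : Prop := out = Lines_in_60char_alt InputFile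
instance (InputFile : List String) (out : String) : Decidable (Spec_Lines_in_60char InputFile out) := by unfold Spec_Lines_in_60char; infer_instance

-- ===== CLAIM (what is proved, stated in full; the proofs are below) =====
def Claim_equal_Lines_in_60char : Prop := ∀ (InputFile : List String), Dom_Lines_in_60char InputFile → Spec_Lines_in_60char InputFile (Lines_in_60char InputFile)

-- ===== LEMMAS AND PROOFS =====

-- the characters either program emits for one input line
def pvLineChars (s : String) : List Char :=
  let r := PySem.Chars.rstrip s.toList
  (List.range ((r.length + 59) / 60)).flatMap
    (fun k => (r.drop (60 * k)).take 60 ++ ['\n']) ++ ['\n']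

theorem pvStrFold {α : Type} (f : String → α → String) (g : α → List Char)
    (h : ∀ acc x, (f acc x).toList = acc.toList ++ g x) :
    ∀ (l : List α) (init : String),
      (l.foldl f init).toList = init.toList ++ l.flatMap g := by
  intro l
  induction l with
  | nil => intro init; simp
  | cons x t ih => intro init; simp [List.foldl_cons, ih, h init x]

theorem pvListFold {α β : Type} (f : List β → α → List β) (g : α → List β)
    (h : ∀ acc x, f acc x = acc ++ g x) :
    ∀ (l : List α) (init : List β),
      l.foldl f init = init ++ l.flatMap g := by
  intro l
  induction l with
  | nil => intro init; simp
  | cons x t ih => intro init; simp [List.foldl_cons, ih, h init x]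

-- A's ceil-chunk count equals (L + 59) / 60
theorem pvCeilEq (L : Nat) :
    (if PySem.Int.mod (L : Int) 60 ≠ 0 then PySem.Int.truncdiv (L : Int) 60 + 1
     else PySem.Int.truncdiv (L : Int) 60) = (((L + 59) / 60 : Nat) : Int) := by
  have ht : PySem.Int.truncdiv (L : Int) 60 = ((L / 60 : Nat) : Int) := by
    unfold PySem.Int.truncdiv
    exact_mod_cast (Int.ofNat_tdiv L 60).symm
  have hm : PySem.Int.mod (L : Int) 60 = ((L % 60 : Nat) : Int) := by
    unfold PySem.Int.mod
    exact_mod_cast (Int.ofNat_fmod L 60).symm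
  rw [ht, hm]
  split_ifs with h <;> (push_cast; omega)

theorem pvChunkEq (r : List Char) (k : Nat) :
    PySem.List.slice r (some ((k : Int) * 60)) (some ((k : Int) * 60 + 60))
      = (r.drop (60 * k)).take 60 := by
  have h := PySem.List.slice_natCast_add r (60 * k) 60
  push_cast at h
  rw [← h]; ring_nf

-- the final chunk of A's range(N+1) loop is empty
theorem pvLastChunkNil (r : List Char) :
    (r.drop (60 * ((r.length + 59) / 60))).take 60 = ([] : List Char) := by
  rw [List.drop_eq_nil_of_le (by omega)]
  simp

-- A's inner loop over range(N_60mers + 1) emits exactly pvLineChars s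
theorem pvAline (s : String) (output : String) :
    ((PySem.List.pyRange 0
        ((if PySem.Int.mod (PySem.Str.len (PySem.Str.rstrip s)) 60 ≠ 0 then
            PySem.Int.truncdiv (PySem.Str.len (PySem.Str.rstrip s)) 60 + 1
          else PySem.Int.truncdiv (PySem.Str.len (PySem.Str.rstrip s)) 60) + 1) 1).foldl
      (fun output i =>
        output ++ PySem.Str.slice (PySem.Str.rstrip s) (some (i * 60)) (some (i * 60 + 60)) ++ "\n")
      output).toList = output.toList ++ pvLineChars s := by
  have hlen : PySem.Str.len (PySem.Str.rstrip s)
      = (((PySem.Chars.rstrip s.toList).length : Nat) : Int) := by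
    simp [PySem.Str.len_eq, PySem.Str.toList_rstrip]
  rw [hlen, pvCeilEq]
  have harg : (((((PySem.Chars.rstrip s.toList).length + 59) / 60 : Nat) : Int) + 1)
      = (((((PySem.Chars.rstrip s.toList).length + 59) / 60 + 1 : Nat)) : Int) := by
    push_cast; ring
  rw [harg, PySem.List.pyRange_zero_natCast]
  rw [pvStrFold _ (fun i => (PySem.Str.slice (PySem.Str.rstrip s)
        (some (i * 60)) (some (i * 60 + 60))).toList ++ ['\n'])
      (by intro acc x; simp)]
  rw [List.flatMap_map]
  simp only [PySem.Str.toList_slice, PySem.Str.toList_rstrip,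
    PySem.Chars.slice_eq_listSlice, pvChunkEq]
  rw [List.range_succ, List.flatMap_append]
  simp [pvLineChars, pvLastChunkNil]

theorem pvAchars (InputFile : List String) :
    (Lines_in_60char InputFile).toList = InputFile.flatMap pvLineChars := by
  unfold Lines_in_60char
  rw [pvStrFold _ pvLineChars (fun acc x => pvAline x acc)]
  simp

-- B side: the streamed characters of one line with all full 60-blocks terminated by '\n'
def pvC (r : List Char) : List Char :=
  (List.range (r.length / 60)).flatMap (fun k => (r.drop (60 * k)).take 60 ++ ['\n'])
    ++ r.drop (60 * (r.length / 60))

-- streaming fewer than the remaining capacity just appends the characters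
theorem pvStreamSmall : ∀ (r : List Char) (acc : List Char) (cnt : Nat),
    cnt + r.length < 60 → r.foldl pvStep (acc, cnt) = (acc ++ r, cnt + r.length) := by
  intro r
  induction r with
  | nil => intro acc cnt _; simp
  | cons c t ih =>
    intro acc cnt h
    simp only [List.foldl_cons, pvStep]
    have hne : ¬ (cnt + 1 == 60) = true := by
      simp only [List.length_cons] at h
      simp only [beq_iff_eq]
      omega
    rw [if_neg hne]
    rw [ih (acc ++ [c]) (cnt + 1) (by simp at h ⊢; omega)]
    rw [Prod.mk.injEq]
    refine ⟨by simp, by simp only [List.length_cons]; omega⟩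

-- streaming exactly the remaining capacity fills the block and emits '\n', resetting to 0
theorem pvStreamFill : ∀ (r : List Char) (acc : List Char) (cnt : Nat),
    cnt < 60 → r.length = 60 - cnt → r.foldl pvStep (acc, cnt) = (acc ++ r ++ ['\n'], 0) := by
  intro r
  induction r with
  | nil => intro acc cnt h1 h2; simp at h2; omega
  | cons c t ih =>
    intro acc cnt h1 h2
    simp only [List.foldl_cons, pvStep]
    by_cases h : cnt + 1 = 60
    · have ht : t = [] := by
        have : t.length = 0 := by simp at h2; omega
        exact List.eq_nil_of_length_eq_zero this
      subst ht
      simp [h]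
    · rw [if_neg (by simp; omega)]
      rw [ih (acc ++ [c]) (cnt + 1) (by omega) (by simp at h2; omega)]
      simp

-- the main invariant: streaming a whole line from counter 0
theorem pvStreamZero : ∀ (n : Nat) (r : List Char) (acc : List Char), r.length ≤ n →
    r.foldl pvStep (acc, 0) = (acc ++ pvC r, r.length % 60) := by
  intro n
  induction n with
  | zero =>
    intro r acc h
    have : r = [] := List.eq_nil_of_length_eq_zero (by omega)
    subst this; simp [pvC]
  | succ n ih =>
    intro r acc h
    by_cases hs : r.length < 60
    · rw [pvStreamSmall r acc 0 (by omega)]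
      have h60 : r.length / 60 = 0 := by omega
      simp [pvC, h60]
      omega
    · push_neg at hs
      have hsplit : r = r.take 60 ++ r.drop 60 := (List.take_append_drop 60 r).symm
      conv_lhs => rw [hsplit]
      rw [List.foldl_append]
      rw [pvStreamFill (r.take 60) acc 0 (by omega) (by simp; omega)]
      rw [ih (r.drop 60) _ (by simp; omega)]
      have hd : (r.drop 60).length = r.length - 60 := by simp
      rw [Prod.mk.injEq]
      refine ⟨?_, ?_⟩
      · -- accumulator part: pvC r = take 60 ++ '\n' ++ pvC (drop 60)
        have hq : r.length / 60 = (r.length - 60) / 60 + 1 := by omega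
        simp only [pvC, hd, hq]
        rw [List.range_succ_eq_map, List.flatMap_cons, List.flatMap_map]
        have hdd : ∀ k : Nat, (r.drop 60).drop (60 * k) = r.drop (60 * (k + 1)) := by
          intro k; rw [List.drop_drop]; ring_nf
        simp only [hdd]
        simp [Nat.succ_eq_add_one, List.append_assoc]
      · rw [hd]; omega

-- B's per-line emission equals pvLineChars
theorem pvBlineEq (s : String) :
    (if (PySem.Chars.rstrip s.toList).length % 60 ≠ 0 then
        pvC (PySem.Chars.rstrip s.toList) ++ ['\n']
      else pvC (PySem.Chars.rstrip s.toList)) ++ ['\n'] = pvLineChars s := by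
  set r := PySem.Chars.rstrip s.toList with hr
  by_cases h : r.length % 60 = 0
  · rw [if_neg (by omega)]
    have hceil : (r.length + 59) / 60 = r.length / 60 := by omega
    have hmul : 60 * (r.length / 60) = r.length := by omega
    simp [pvLineChars, pvC, hceil, hmul, ← hr, List.drop_length]
  · rw [if_pos h]
    have hceil : (r.length + 59) / 60 = r.length / 60 + 1 := by omega
    have hlast : (r.drop (60 * (r.length / 60))).take 60 = r.drop (60 * (r.length / 60)) := by
      apply List.take_of_length_le
      simp; omega
    simp only [pvLineChars, ← hr, hceil, List.range_succ, List.flatMap_append,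
      List.flatMap_cons, List.flatMap_nil, hlast, pvC]
    simp [List.append_assoc]

theorem pvBchars (InputFile : List String) :
    (Lines_in_60char_alt InputFile).toList = InputFile.flatMap pvLineChars := by
  unfold Lines_in_60char_alt
  rw [pvListFold _ pvLineChars
      (by
        intro acc x
        show (if ((PySem.Str.rstrip x).toList.foldl pvStep (acc, 0)).2 ≠ 0 then
               ((PySem.Str.rstrip x).toList.foldl pvStep (acc, 0)).1 ++ ['\n']
             else ((PySem.Str.rstrip x).toList.foldl pvStep (acc, 0)).1) ++ ['\n'] = _
        rw [PySem.Str.toList_rstrip,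
          pvStreamZero (PySem.Chars.rstrip x.toList).length _ acc (le_refl _)]
        rw [← pvBlineEq x]
        split_ifs <;> simp [List.append_assoc])]
  simp

-- ===== VERDICT (by name: the statement is the Claim_ definition above) =====
theorem Lines_in_60char_spec : Claim_equal_Lines_in_60char := by
  intro InputFile _
  unfold Spec_Lines_in_60char
  have h : (Lines_in_60char InputFile).toList = (Lines_in_60char_alt InputFile).toList := by
    rw [pvAchars, pvBchars]
  have h2 := congrArg String.ofList h
  simpa using h2
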